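-- pv_equiv track=rewrite | github.com/PRANESH05S/SEM-2-PYTHON-PROGRAMMING-FLAMES-GAME | code.py | count_common_letters
-- ===== SOURCE A (Python) =====
-- def count_common_letters(name1, name2):
--     name1_list = list(name1.lower().replace(" ", ""))
--     name2_list = list(name2.lower().replace(" ", ""))
--     for letter in name1_list[:]:
--         if letter in name2_list:
--             name1_list.remove(letter)
--             name2_list.remove(letter)
--     return len(name1_list + name2_list)
-- ===== SOURCE B (Python) =====
-- def count_common_letters(name1, name2):
--     l1 = sorted(name1.lower().replace(" ", ""))
--     l2 = sorted(name2.lower().replace(" ", ""))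
--     i = j = matched = 0
--     while i < len(l1) and j < len(l2):
--         if l1[i] == l2[j]:
--             matched += 1
--             i += 1
--             j += 1
--         elif l1[i] < l2[j]:
--             i += 1
--         else:
--             j += 1
--     return len(l1) + len(l2) - 2 * matched
-- ===== Notes on version B (the rewrite author's own statement) =====
-- stated objective: faster
-- what changed: Replaces A's nested scan-and-remove loop (membership test plus two list.remove scans per letter) by sorting both cleaned names once and counting matches in a single two-pointer merge pass, returning len1+len2-2*matched.
import Mathlib
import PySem

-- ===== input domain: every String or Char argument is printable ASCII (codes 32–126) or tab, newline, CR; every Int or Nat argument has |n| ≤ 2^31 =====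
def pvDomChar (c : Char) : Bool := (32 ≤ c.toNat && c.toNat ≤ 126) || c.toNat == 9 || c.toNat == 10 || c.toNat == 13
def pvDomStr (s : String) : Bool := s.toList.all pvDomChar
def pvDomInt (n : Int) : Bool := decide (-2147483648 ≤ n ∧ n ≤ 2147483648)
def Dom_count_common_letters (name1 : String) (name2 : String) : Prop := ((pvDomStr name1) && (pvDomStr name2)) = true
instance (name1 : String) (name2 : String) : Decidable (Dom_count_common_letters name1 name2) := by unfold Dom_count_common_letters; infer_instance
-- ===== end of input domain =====

-- B replaces A's nested scan-and-remove by sort + one two-pointer merge pass (alternative decomposition; same observable value).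

-- ===== PORT A =====
-- list.remove is ported as List.erase: it is exact here because the removed element is
-- always present (in name2_list by the guard; in name1_list because the iterated copy
-- stays a sub-multiset of it — the invariant proved in the lemmas below).
def count_common_letters (name1 : String) (name2 : String) : Int :=
  let name1_list := PySem.Chars.replace (PySem.Chars.lower name1.toList) [' '] []
  let name2_list := PySem.Chars.replace (PySem.Chars.lower name2.toList) [' '] []
  let p := name1_list.foldl
    (fun (p : List Char × List Char) letter =>
      if letter ∈ p.2 then (p.1.erase letter, p.2.erase letter) else p)
    (name1_list, name2_list)
  ((p.1 ++ p.2).length : Int)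

-- ===== PORT B =====
-- the while-loop with indices i, j of Source B, transcribed as structural consumption of the two sorted lists
def mergeMatched : List Char → List Char → Int
  | [], _ => 0
  | _ :: _, [] => 0
  | a :: t1, b :: t2 =>
    if a = b then 1 + mergeMatched t1 t2
    else if a < b then mergeMatched t1 (b :: t2)
    else mergeMatched (a :: t1) t2
termination_by l1 l2 => l1.length + l2.length

def count_common_letters_alt (name1 : String) (name2 : String) : Int :=
  let l1 := PySem.List.sorted (PySem.Chars.replace (PySem.Chars.lower name1.toList) [' '] []) (fun x => x) false
  let l2 := PySem.List.sorted (PySem.Chars.replace (PySem.Chars.lower name2.toList) [' '] []) (fun x => x) false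
  (l1.length : Int) + (l2.length : Int) - 2 * mergeMatched l1 l2

-- ===== PRECONDITION & SPEC =====
def Spec_count_common_letters (name1 : String) (name2 : String) (out : Int) : Prop := out = count_common_letters_alt name1 name2
instance (name1 : String) (name2 : String) (out : Int) : Decidable (Spec_count_common_letters name1 name2 out) := by unfold Spec_count_common_letters; infer_instance

-- ===== CLAIM (what is proved, stated in full; the proofs are below) =====
def Claim_equal_count_common_letters : Prop := ∀ (name1 : String) (name2 : String), Dom_count_common_letters name1 name2 → Spec_count_common_letters name1 name2 (count_common_letters name1 name2)

-- ===== LEMMAS AND PROOFS =====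

-- A's remove-loop, run over any iteration list zs that is a sub-multiset of the current
-- first list, leaves total length |l1| + |l2| - 2 · |↑zs ∩ ↑l2|.
lemma aLoop_len : ∀ (zs l1 l2 : List Char), (zs : Multiset Char) ≤ (l1 : Multiset Char) →
    (((zs.foldl (fun (p : List Char × List Char) letter =>
        if letter ∈ p.2 then (p.1.erase letter, p.2.erase letter) else p) (l1, l2)).1.length : Int)
      + ((zs.foldl (fun (p : List Char × List Char) letter =>
        if letter ∈ p.2 then (p.1.erase letter, p.2.erase letter) else p) (l1, l2)).2.length : Int))
    = (l1.length : Int) + (l2.length : Int) - 2 * (((zs : Multiset Char) ∩ (l2 : Multiset Char)).card : Int) := by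
  intro zs
  induction zs with
  | nil => intro l1 l2 _; simp
  | cons z zs ih =>
    intro l1 l2 h
    have hz1 : z ∈ l1 := by
      have : z ∈ (l1 : Multiset Char) := Multiset.mem_of_le h (by simp)
      simpa using this
    by_cases hz2 : z ∈ l2
    · have hstep : (List.foldl (fun (p : List Char × List Char) letter =>
          if letter ∈ p.2 then (p.1.erase letter, p.2.erase letter) else p) (l1, l2) (z :: zs))
          = List.foldl (fun (p : List Char × List Char) letter =>
          if letter ∈ p.2 then (p.1.erase letter, p.2.erase letter) else p) (l1.erase z, l2.erase z) zs := by
        simp [hz2]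
      have hle : (zs : Multiset Char) ≤ (l1.erase z : Multiset Char) := by
        have := Multiset.erase_le_erase z h
        simpa [Multiset.coe_erase] using this
      have hrec := ih (l1.erase z) (l2.erase z) hle
      rw [hstep, hrec]
      have hcard : (((z :: zs : List Char) : Multiset Char) ∩ (l2 : Multiset Char)).card
          = ((zs : Multiset Char) ∩ ((l2.erase z : List Char) : Multiset Char)).card + 1 := by
        rw [show ((z :: zs : List Char) : Multiset Char) = z ::ₘ (zs : Multiset Char) from rfl,
          Multiset.cons_inter_of_pos _ (by simpa using hz2), Multiset.coe_erase]
        simp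
      have h1 : (l1.erase z).length = l1.length - 1 := List.length_erase_of_mem hz1
      have h2 : (l2.erase z).length = l2.length - 1 := List.length_erase_of_mem hz2
      have h1p : 1 ≤ l1.length := List.length_pos_of_mem hz1
      have h2p : 1 ≤ l2.length := List.length_pos_of_mem hz2
      rw [hcard, h1, h2]
      push_cast [Nat.cast_sub h1p, Nat.cast_sub h2p]
      ring
    · have hstep : (List.foldl (fun (p : List Char × List Char) letter =>
          if letter ∈ p.2 then (p.1.erase letter, p.2.erase letter) else p) (l1, l2) (z :: zs))
          = List.foldl (fun (p : List Char × List Char) letter =>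
          if letter ∈ p.2 then (p.1.erase letter, p.2.erase letter) else p) (l1, l2) zs := by
        simp [hz2]
      have hle : (zs : Multiset Char) ≤ (l1 : Multiset Char) :=
        le_trans (Multiset.le_cons_self _ _) h
      have hcard : (((z :: zs : List Char) : Multiset Char) ∩ (l2 : Multiset Char))
          = ((zs : Multiset Char) ∩ (l2 : Multiset Char)) := by
        rw [show ((z :: zs : List Char) : Multiset Char) = z ::ₘ (zs : Multiset Char) from rfl,
          Multiset.cons_inter_of_neg _ (by simpa using hz2)]
      rw [hstep, ih l1 l2 hle, hcard]

-- drop a head absent from the other side, right operand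
lemma inter_cons_right_of_neg {a : Char} {s t : Multiset Char} (h : a ∉ s) :
    s ∩ (a ::ₘ t) = s ∩ t := by
  rw [Multiset.inter_comm, Multiset.cons_inter_of_neg _ h, Multiset.inter_comm]

-- B's merge pass on two sorted lists counts the multiset intersection.
lemma merge_card : ∀ (l1 l2 : List Char), l1.Pairwise (· ≤ ·) → l2.Pairwise (· ≤ ·) →
    mergeMatched l1 l2 = (((l1 : Multiset Char) ∩ (l2 : Multiset Char)).card : Int) := by
  intro l1 l2
  induction l1, l2 using mergeMatched.induct with
  | case1 l2 => intro _ _; simp [mergeMatched]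
  | case2 a t1 => intro _ _; simp [mergeMatched]
  | case3 t1 a t2 ih =>
    intro h1 h2
    have : ((a :: t1 : List Char) : Multiset Char) ∩ ((a :: t2 : List Char) : Multiset Char)
        = a ::ₘ ((t1 : Multiset Char) ∩ (t2 : Multiset Char)) := by
      rw [show ((a :: t1 : List Char) : Multiset Char) = a ::ₘ (t1 : Multiset Char) from rfl,
        show ((a :: t2 : List Char) : Multiset Char) = a ::ₘ (t2 : Multiset Char) from rfl,
        Multiset.cons_inter_of_pos _ (by simp), Multiset.erase_cons_head]
    rw [this]
    simp only [mergeMatched, Multiset.card_cons,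
      ih (List.Pairwise.sublist (List.sublist_cons_self a t1) h1)
        (List.Pairwise.sublist (List.sublist_cons_self a t2) h2)]
    push_cast; ring
  | case4 a t1 b t2 hne hlt ih =>
    intro h1 h2
    have hnm : a ∉ (b :: t2) := by
      intro hm
      rcases List.mem_cons.mp hm with h | h
      · exact hne h
      · exact absurd (lt_of_lt_of_le hlt ((List.pairwise_cons.mp h2).1 a h)) (lt_irrefl a)
    have : ((a :: t1 : List Char) : Multiset Char) ∩ ((b :: t2 : List Char) : Multiset Char)
        = (t1 : Multiset Char) ∩ ((b :: t2 : List Char) : Multiset Char) := by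
      rw [show ((a :: t1 : List Char) : Multiset Char) = a ::ₘ (t1 : Multiset Char) from rfl,
        Multiset.cons_inter_of_neg _ (by simpa using hnm)]
    rw [this, ← ih (List.Pairwise.sublist (List.sublist_cons_self a t1) h1) h2]
    simp [mergeMatched, hne, hlt]
  | case5 a t1 b t2 hne hnlt ih =>
    intro h1 h2
    have hba : b < a := lt_of_le_of_ne (not_lt.mp hnlt) (fun h => hne h.symm)
    have hnm : b ∉ (a :: t1) := by
      intro hm
      rcases List.mem_cons.mp hm with h | h
      · exact absurd (h ▸ hba) (lt_irrefl b)
      · exact absurd (lt_of_lt_of_le hba ((List.pairwise_cons.mp h1).1 b h)) (lt_irrefl b)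
    have : ((a :: t1 : List Char) : Multiset Char) ∩ ((b :: t2 : List Char) : Multiset Char)
        = ((a :: t1 : List Char) : Multiset Char) ∩ (t2 : Multiset Char) := by
      rw [show ((b :: t2 : List Char) : Multiset Char) = b ::ₘ (t2 : Multiset Char) from rfl]
      exact inter_cons_right_of_neg (by simpa using hnm)
    rw [this, ← ih h1 (List.Pairwise.sublist (List.sublist_cons_self b t2) h2)]
    simp [mergeMatched, hne, hnlt]

-- ===== VERDICT (by name: the statement is the Claim_ definition above) =====
theorem count_common_letters_spec : Claim_equal_count_common_letters := by
  intro name1 name2 _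
  unfold Spec_count_common_letters count_common_letters count_common_letters_alt
  set cs1 := PySem.Chars.replace (PySem.Chars.lower name1.toList) [' '] [] with hcs1
  set cs2 := PySem.Chars.replace (PySem.Chars.lower name2.toList) [' '] [] with hcs2
  set s1 := PySem.List.sorted cs1 (fun x => x) false with hs1
  set s2 := PySem.List.sorted cs2 (fun x => x) false with hs2
  have hp1 : s1.Perm cs1 := PySem.List.sorted_perm ..
  have hp2 : s2.Perm cs2 := PySem.List.sorted_perm ..
  have hm1 : (s1 : Multiset Char) = (cs1 : Multiset Char) := Multiset.coe_eq_coe.mpr hp1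
  have hm2 : (s2 : Multiset Char) = (cs2 : Multiset Char) := Multiset.coe_eq_coe.mpr hp2
  have hA := aLoop_len cs1 cs1 cs2 (le_refl _)
  have hB := merge_card s1 s2
    (by simpa using PySem.List.sorted_pairwise cs1 (fun x => x))
    (by simpa using PySem.List.sorted_pairwise cs2 (fun x => x))
  simp only [List.length_append]
  push_cast
  rw [hA, hB, hm1, hm2, hp1.length_eq, hp2.length_eq]
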